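-- pv_equiv track=rewrite | github.com/seunggeuncho/Coding_test | 분할정복/투에-모스 문자열.py | mose
-- ===== SOURCE A (Python) =====
-- def mose(x):
--     if x == 0:
--         return 0
--     elif x == 1:
--         return 1
--     elif x % 2 == 0:
--         return mose(x // 2)
--     else:
--         return 1 - mose(x // 2)
-- ===== SOURCE B (Python) =====
-- def mose(x):
--     result = 0
--     while x:
--         result ^= x & 1
--         x >>= 1
--     return result
-- ===== Notes on version B (the rewrite author's own statement) =====
-- stated objective: alternative
-- what changed: Replaces the recursive branch-on-parity definition by an iterative loop that XOR-accumulates the low bit while shifting x right, diverging on negatives exactly like the recursion.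
import Mathlib
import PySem

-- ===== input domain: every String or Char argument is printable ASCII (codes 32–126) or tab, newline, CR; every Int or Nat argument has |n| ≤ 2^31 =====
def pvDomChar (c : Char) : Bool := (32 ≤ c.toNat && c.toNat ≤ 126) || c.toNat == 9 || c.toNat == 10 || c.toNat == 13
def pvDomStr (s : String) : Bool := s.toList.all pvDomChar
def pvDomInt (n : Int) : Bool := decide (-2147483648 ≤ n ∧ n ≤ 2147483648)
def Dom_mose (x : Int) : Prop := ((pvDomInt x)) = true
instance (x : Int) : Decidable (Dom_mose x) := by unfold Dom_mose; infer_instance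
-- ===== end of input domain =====

-- B replaces A's recursion on parity by an iterative loop that XOR-accumulates the low bit (alternative decomposition, same cost).


-- ===== PORT A =====
-- literal port of the recursion; for x < 0 the Python recursion never terminates
-- (RecursionError), excluded by Pre_mose; the 'x < 0' guard only makes the Lean
-- function total and is never reached under Pre_mose.
def mose (x : Int) : Int :=
  if _h : x < 0 then 0
  else if x = 0 then 0
  else if x = 1 then 1
  else if PySem.Int.mod x 2 = 0 then mose (PySem.Int.floordiv x 2)
  else 1 - mose (PySem.Int.floordiv x 2)
termination_by x.toNat
decreasing_by
  all_goals
    rw [PySem.Int.floordiv_eq_ediv_of_pos (by omega)]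
    omega

-- ===== PORT B =====
-- termination helper for the loop port (cited by decreasing_by only)
theorem pvShiftRight_toNat_lt (x : Int) (h : 0 < x) : (x >>> (1:Int)).toNat < x.toNat := by
  obtain ⟨m, rfl⟩ := Int.eq_ofNat_of_zero_le h.le
  rw [show ((1:Int)) = ((1:Nat):Int) by norm_num, Int.shiftRight_natCast m 1,
    Nat.shiftRight_one]
  simp only [Int.toNat_natCast]
  omega

-- the while loop: result ^= x & 1; x >>= 1.  'x & 1' is ported as Int.land x 1 and
-- '^' as Int.xor (exact two's-complement bitwise semantics); for x < 0 the Python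
-- loop never terminates (excluded by Pre_mose); the 'x ≤ 0 → result' guard only
-- makes the Lean function total and coincides with the loop exit 'while x' on x = 0.
def moseLoop (x result : Int) : Int :=
  if _h : x ≤ 0 then result
  else moseLoop (x >>> (1:Int)) (Int.xor result (Int.land x 1))
termination_by x.toNat
decreasing_by
  exact pvShiftRight_toNat_lt x (by omega)

def mose_alt (x : Int) : Int := moseLoop x 0

-- ===== PRECONDITION & SPEC =====
-- Pre_ excludes x < 0, where the Python A recurses forever (RecursionError).
def Pre_mose (x : Int) : Prop := 0 ≤ x
instance (x : Int) : Decidable (Pre_mose x) := by unfold Pre_mose; infer_instance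
def pvWitness_mose : Int := 6
def Spec_mose (x : Int) (out : Int) : Prop := out = mose_alt x
instance (x : Int) (out : Int) : Decidable (Spec_mose x out) := by unfold Spec_mose; infer_instance

-- ===== CLAIM (what is proved, stated in full; the proofs are below) =====
def Claim_equal_mose : Prop := ∀ (x : Int), Dom_mose x → Pre_mose x → Spec_mose x (mose x)

-- ===== LEMMAS AND PROOFS =====

theorem mose_mem (m : Nat) : mose (↑m) = 0 ∨ mose (↑m) = 1 := by
  induction m using Nat.strong_induction_on with
  | _ m ih =>
    unfold mose
    split_ifs with h0 h1 h2 h3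
    · left; rfl
    · left; rfl
    · right; rfl
    · rw [show PySem.Int.floordiv (↑m) 2 = ((m / 2 : Nat) : Int) by
        rw [PySem.Int.floordiv_eq_ediv_of_pos (by omega)]; omega]
      exact ih (m / 2) (by omega)
    · rw [show PySem.Int.floordiv (↑m) 2 = ((m / 2 : Nat) : Int) by
        rw [PySem.Int.floordiv_eq_ediv_of_pos (by omega)]; omega]
      rcases ih (m / 2) (by omega) with h | h <;> rw [h]
      · right; norm_num
      · left; norm_num

theorem mose_bit (m : Nat) (hm : 0 < m) :
    mose (↑m) = Int.xor (↑(m % 2)) (mose (↑(m / 2))) := by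
  have hfd : PySem.Int.floordiv (↑m) 2 = ((m / 2 : Nat) : Int) := by
    rw [PySem.Int.floordiv_eq_ediv_of_pos (by omega)]; omega
  have hmod : PySem.Int.mod (↑m) 2 = ((m % 2 : Nat) : Int) := by
    rw [PySem.Int.mod_eq_emod_of_pos (by omega)]; omega
  conv_lhs => unfold mose
  split_ifs with h0 h1 h2 h3
  · omega
  · omega
  · -- m = 1
    have : m = 1 := by exact_mod_cast h2
    subst this
    norm_num
    unfold mose
    norm_num
    decide
  · -- even
    have he : m % 2 = 0 := by
      have := hmod ▸ h3; exact_mod_cast this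
    rw [hfd, he]
    rcases mose_mem (m / 2) with h | h <;> rw [h] <;> rfl
  · -- odd
    have ho : m % 2 = 1 := by
      rw [hmod] at h3; omega
    rw [hfd, ho]
    rcases mose_mem (m / 2) with h | h <;> rw [h] <;> rfl

theorem moseLoop_eq (m : Nat) (acc : Int) (hacc : acc = 0 ∨ acc = 1) :
    moseLoop (↑m) acc = Int.xor acc (mose (↑m)) := by
  induction m using Nat.strong_induction_on generalizing acc with
  | _ m ih =>
    unfold moseLoop
    split_ifs with h
    · have hm0 : m = 0 := by omega
      subst hm0
      simp only [Nat.cast_zero]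
      have : mose (0:Int) = 0 := by unfold mose; norm_num
      rw [this]
      rcases hacc with h | h <;> rw [h] <;> rfl
    · have hm : 0 < m := by omega
      have hsh : (↑m : Int) >>> (1:Int) = ((m / 2 : Nat) : Int) := by
        rw [show ((1:Int)) = ((1:Nat):Int) by norm_num, Int.shiftRight_natCast m 1,
          Nat.shiftRight_one]
      have hland : Int.land (↑m) 1 = ((m % 2 : Nat) : Int) := by
        show ((m &&& 1 : Nat) : Int) = _
        rw [Nat.and_one_is_mod]
      rw [hsh, hland]
      have hacc' : Int.xor acc (↑(m % 2)) = 0 ∨ Int.xor acc (↑(m % 2)) = 1 := by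
        have h2 : m % 2 = 0 ∨ m % 2 = 1 := by omega
        rcases hacc with ha | ha <;> rcases h2 with hb | hb <;>
          rw [ha, hb] <;> first | (left; rfl) | (right; rfl)
      rw [ih (m / 2) (by omega) _ hacc', mose_bit m hm]
      -- xor associativity on {0,1} values, by cases
      have h2 : m % 2 = 0 ∨ m % 2 = 1 := by omega
      rcases mose_mem (m / 2) with hc | hc <;>
        rcases hacc with ha | ha <;> rcases h2 with hb | hb <;>
          rw [ha, hb, hc] <;> rfl

-- ===== VERDICT (by name: the statement is the Claim_ definition above) =====
theorem mose_spec : Claim_equal_mose := by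
  intro x _ hpre
  unfold Spec_mose mose_alt
  obtain ⟨m, rfl⟩ := Int.eq_ofNat_of_zero_le hpre
  rw [moseLoop_eq m 0 (Or.inl rfl)]
  rcases mose_mem m with h | h <;> rw [h] <;> rfl
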